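-- pv_equiv track=rewrite | github.com/lanl/QAOA_vs_QA | create_horizontal_heavy_hex_Pegasus_embeddings.py | get_pegasus_cell_coordinates_horizontal_heavy_hex_version2
-- ===== SOURCE A (Python) =====
-- from itertools import cycle
--
-- def get_pegasus_cell_coordinates_horizontal_heavy_hex_version2(N, initial_cell):
-- 	new_cells = [initial_cell]
-- 	if initial_cell[0] == 2:
-- 		pool = cycle([1, 0, 2])
-- 	elif initial_cell[0] == 1:
-- 		pool = cycle([0, 2, 1])
-- 	elif initial_cell[0] == 0:
-- 		pool = cycle([2, 1, 0])
-- 	index_zero_list = [next(pool) for a in range(N)]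
--
-- 	index_two_list = []
-- 	MOD = initial_cell[2]%2
-- 	assert MOD==0, "To make things simple, we enfore that the first coordinate has an even number in the 3rd index coordinate"
-- 	offset = initial_cell[2]
-- 	while len(index_two_list) < N:
-- 		if MOD == 0:
-- 			index_two_list.append(offset+1)
-- 			index_two_list.append(offset+1)
-- 			MOD = 1
-- 		elif MOD == 1:
-- 			index_two_list.append(offset+1)
-- 			MOD = 0
-- 		offset = offset+1
--
-- 	index_one_list = []
-- 	offset = initial_cell[1]
-- 	COUNT = 0
-- 	while len(index_one_list) < N:
-- 		COUNT += 1
-- 		if COUNT == 1: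
-- 			index_one_list.append(offset)
-- 		else:
-- 			index_one_list.append(offset)
-- 			index_one_list.append(offset)
-- 			index_one_list.append(offset)
-- 		offset += 1
--
-- 	for i in range(N-1):
-- 		new_cells.append((index_zero_list[i], index_one_list[i], index_two_list[i]))
-- 	return new_cells
-- ===== SOURCE B (Python) =====
-- def get_pegasus_cell_coordinates_horizontal_heavy_hex_version2(N, initial_cell):
-- 	assert initial_cell[2]%2==0, "To make things simple, we enfore that the first coordinate has an even number in the 3rd index coordinate"
-- 	cycle_base = {2: (1, 0, 2), 1: (0, 2, 1), 0: (2, 1, 0)}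
-- 	new_cells = [initial_cell]
-- 	for i in range(N - 1):
-- 		new_cells.append((cycle_base[initial_cell[0]][i % 3],
-- 		                  initial_cell[1] + (i + 2) // 3,
-- 		                  initial_cell[2] + 2 * (i // 3) + 1 + (1 if i % 3 == 2 else 0)))
-- 	return new_cells
-- ===== Notes on version B (the rewrite author's own statement) =====
-- stated objective: simpler
-- what changed: Replaced A's cycle-consumer comprehension and two stateful while-append loops (building three index lists that are then re-indexed) by closed-form index formulas (pattern[i%3], ic1+(i+2)//3, ic2+2*(i//3)+1+(i%3==2)) computed in a single pass over range(N-1).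
import Mathlib
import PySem

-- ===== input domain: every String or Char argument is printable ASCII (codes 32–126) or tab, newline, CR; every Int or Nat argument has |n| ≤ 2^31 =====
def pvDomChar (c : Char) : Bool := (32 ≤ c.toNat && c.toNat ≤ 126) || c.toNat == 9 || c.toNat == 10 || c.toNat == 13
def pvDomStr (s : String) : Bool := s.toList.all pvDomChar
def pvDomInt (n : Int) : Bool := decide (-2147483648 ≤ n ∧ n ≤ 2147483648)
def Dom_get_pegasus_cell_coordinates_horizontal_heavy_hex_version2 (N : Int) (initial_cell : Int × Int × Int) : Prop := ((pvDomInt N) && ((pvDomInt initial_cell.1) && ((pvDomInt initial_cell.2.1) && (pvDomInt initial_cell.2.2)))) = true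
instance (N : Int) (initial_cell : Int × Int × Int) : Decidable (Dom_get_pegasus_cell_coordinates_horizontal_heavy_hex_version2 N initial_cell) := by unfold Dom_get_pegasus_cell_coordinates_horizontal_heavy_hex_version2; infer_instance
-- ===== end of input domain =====

-- B replaces A's three stateful list-building loops (a cycle consumer and two while-append loops)
-- by closed-form index formulas computed inside one pass over range(N-1): objective 'simpler'.

-- ===== PORT A =====
-- if/elif chain choosing the cycled pattern; [] for an invalid first coordinate (outside Pre_, where A raises NameError)
def pvPoolPattern (c0 : Int) : List Int :=
  if c0 = 2 then [1, 0, 2] else if c0 = 1 then [0, 2, 1] else if c0 = 0 then [2, 1, 0] else []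

-- the while-loop building index_two_list; fuel = N.toNat is enough (each pass appends ≥ 1 element)
def pvLoopTwo (fuel : Nat) (N : Int) (acc : List Int) (MOD offset : Int) : List Int :=
  match fuel with
  | 0 => acc
  | f + 1 =>
    if (acc.length : Int) < N then
      if MOD = 0 then pvLoopTwo f N (acc ++ [offset + 1, offset + 1]) 1 (offset + 1)
      else if MOD = 1 then pvLoopTwo f N (acc ++ [offset + 1]) 0 (offset + 1)
      else pvLoopTwo f N acc MOD (offset + 1)
    else acc

-- the while-loop building index_one_list
def pvLoopOne (fuel : Nat) (N : Int) (acc : List Int) (offset COUNT : Int) : List Int :=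
  match fuel with
  | 0 => acc
  | f + 1 =>
    if (acc.length : Int) < N then
      if COUNT + 1 = 1 then pvLoopOne f N (acc ++ [offset]) (offset + 1) (COUNT + 1)
      else pvLoopOne f N (acc ++ [offset, offset, offset]) (offset + 1) (COUNT + 1)
    else acc

def get_pegasus_cell_coordinates_horizontal_heavy_hex_version2 (N : Int) (initial_cell : Int × Int × Int) : List (Int × Int × Int) :=
  -- [next(pool) for a in range(N)]: the a-th next of cycle(p) is p[a % 3]
  let index_zero_list : List Int :=
    (PySem.List.pyRange 0 N 1).map (fun a => (pvPoolPattern initial_cell.1).getD (PySem.Int.mod a 3).toNat 0)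
  let MOD := PySem.Int.mod initial_cell.2.2 2
  -- assert MOD == 0 : AssertionError outside Pre_
  let index_two_list := pvLoopTwo N.toNat N [] MOD initial_cell.2.2
  let index_one_list := pvLoopOne N.toNat N [] initial_cell.2.1 0
  [initial_cell] ++ (PySem.List.pyRange 0 (N - 1) 1).map (fun i =>
    (PySem.List.pyGetD index_zero_list i 0,
     PySem.List.pyGetD index_one_list i 0,
     PySem.List.pyGetD index_two_list i 0))

-- ===== PORT B =====
-- the dict literal cycle_base (values as 3-element lists; Source B's tuples are indexed by i % 3)
def pvCycleBase : PySem.Dict Int (List Int) := PySem.Dict.ofList [(2, [1, 0, 2]), (1, [0, 2, 1]), (0, [2, 1, 0])]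

def get_pegasus_cell_coordinates_horizontal_heavy_hex_version2_alt (N : Int) (initial_cell : Int × Int × Int) : List (Int × Int × Int) :=
  -- assert initial_cell[2] % 2 == 0 : AssertionError outside Pre_
  [initial_cell] ++ (PySem.List.pyRange 0 (N - 1) 1).map (fun i =>
    (((PySem.Dict.get? pvCycleBase initial_cell.1).getD []).getD (PySem.Int.mod i 3).toNat 0,
     initial_cell.2.1 + PySem.Int.floordiv (i + 2) 3,
     initial_cell.2.2 + 2 * PySem.Int.floordiv i 3 + 1 + (if PySem.Int.mod i 3 = 2 then 1 else 0)))

-- ===== PRECONDITION & SPEC =====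
-- Pre_ excludes exactly the inputs where A raises: AssertionError for an odd third coordinate,
-- and NameError (pool undefined) when N ≥ 1 and the first coordinate is not 0, 1 or 2.
def Pre_get_pegasus_cell_coordinates_horizontal_heavy_hex_version2 (N : Int) (initial_cell : Int × Int × Int) : Prop :=
  PySem.Int.mod initial_cell.2.2 2 = 0 ∧
  (1 ≤ N → (initial_cell.1 = 0 ∨ initial_cell.1 = 1 ∨ initial_cell.1 = 2))
instance (N : Int) (initial_cell : Int × Int × Int) : Decidable (Pre_get_pegasus_cell_coordinates_horizontal_heavy_hex_version2 N initial_cell) := by unfold Pre_get_pegasus_cell_coordinates_horizontal_heavy_hex_version2; infer_instance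

def pvWitness_get_pegasus_cell_coordinates_horizontal_heavy_hex_version2 : Int × (Int × Int × Int) := (5, (2, 0, 0))

def Spec_get_pegasus_cell_coordinates_horizontal_heavy_hex_version2 (N : Int) (initial_cell : Int × Int × Int) (out : List (Int × Int × Int)) : Prop := out = get_pegasus_cell_coordinates_horizontal_heavy_hex_version2_alt N initial_cell
instance (N : Int) (initial_cell : Int × Int × Int) (out : List (Int × Int × Int)) : Decidable (Spec_get_pegasus_cell_coordinates_horizontal_heavy_hex_version2 N initial_cell out) := by unfold Spec_get_pegasus_cell_coordinates_horizontal_heavy_hex_version2; infer_instance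

-- ===== CLAIM (what is proved, stated in full; the proofs are below) =====
def Claim_equal_get_pegasus_cell_coordinates_horizontal_heavy_hex_version2 : Prop := ∀ (N : Int) (initial_cell : Int × Int × Int), Dom_get_pegasus_cell_coordinates_horizontal_heavy_hex_version2 N initial_cell → Pre_get_pegasus_cell_coordinates_horizontal_heavy_hex_version2 N initial_cell → Spec_get_pegasus_cell_coordinates_horizontal_heavy_hex_version2 N initial_cell (get_pegasus_cell_coordinates_horizontal_heavy_hex_version2 N initial_cell)

-- ===== LEMMAS AND PROOFS =====

-- closed forms for the element streams of A's two while-loops (Nat index)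
def pvGTwo (o0 : Int) (j : Nat) : Int := o0 + 2 * (j / 3 : Nat) + 1 + (if j % 3 = 2 then 1 else 0)
def pvGOne (o0 : Int) (j : Nat) : Int := o0 + ((j + 2) / 3 : Nat)

lemma pvLoopTwo_spec (fuel : Nat) : ∀ (N o0 : Int) (acc : List Int) (MOD offset : Int),
    N.toNat ≤ acc.length + fuel →
    (acc.length % 3 = 0 ∨ acc.length % 3 = 2) →
    MOD = (if acc.length % 3 = 0 then (0 : Int) else 1) →
    offset = o0 + 2 * (acc.length / 3 : Nat) + (if acc.length % 3 = 2 then 1 else 0) →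
    (∀ j (hj : j < acc.length), acc[j] = pvGTwo o0 j) →
    N ≤ ((pvLoopTwo fuel N acc MOD offset).length : Int) ∧
    ∀ j (hj : j < (pvLoopTwo fuel N acc MOD offset).length),
      (pvLoopTwo fuel N acc MOD offset)[j] = pvGTwo o0 j := by
  induction fuel with
  | zero =>
    intro N o0 acc MOD offset hfuel _ _ _ helem
    refine ⟨by simpa [pvLoopTwo] using (by omega : N ≤ (acc.length : Int)), ?_⟩
    simpa [pvLoopTwo] using helem
  | succ f ih =>
    intro N o0 acc MOD offset hfuel hlen hMOD hoff helem
    by_cases hc : (acc.length : Int) < N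
    · rcases hlen with h3 | h3
      · -- MOD = 0 branch: append two copies of offset+1
        have hM : MOD = 0 := by rw [hMOD]; simp [h3]
        subst hM
        rw [pvLoopTwo, if_pos hc, if_pos rfl]
        apply ih
        · simp only [List.length_append, List.length_cons, List.length_nil]; omega
        · simp only [List.length_append, List.length_cons, List.length_nil]; omega
        · simp only [List.length_append, List.length_cons, List.length_nil]
          split_ifs with h <;> omega
        · subst hoff
          simp only [List.length_append, List.length_cons, List.length_nil]
          split_ifs <;> push_cast <;> omega
        · intro j hj
          simp only [List.length_append, List.length_cons, List.length_nil] at hj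
          by_cases hlt : j < acc.length
          · rw [List.getElem_append_left hlt]; exact helem j hlt
          · have hval : (acc ++ [offset + 1, offset + 1])[j] = offset + 1 := by
              rcases (by omega : j = acc.length ∨ j = acc.length + 1) with h | h <;>
                simp [List.getElem_append_right, h]
            rw [hval]
            subst hoff
            simp only [pvGTwo]
            have e1 : j / 3 = acc.length / 3 := by omega
            have e2 : j % 3 ≠ 2 := by omega
            simp only [e1, if_neg e2, if_neg (by omega : ¬ acc.length % 3 = 2)]
            ring
      · -- MOD = 1 branch: append one copy of offset+1
        have hM : MOD = 1 := by rw [hMOD]; simp [show ¬ acc.length % 3 = 0 by omega]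
        subst hM
        rw [pvLoopTwo, if_pos hc, if_neg (by norm_num : ¬ (1 : Int) = 0), if_pos rfl]
        apply ih
        · simp only [List.length_append, List.length_cons, List.length_nil]; omega
        · simp only [List.length_append, List.length_cons, List.length_nil]; omega
        · simp only [List.length_append, List.length_cons, List.length_nil]
          split_ifs with h <;> omega
        · subst hoff
          simp only [List.length_append, List.length_cons, List.length_nil]
          split_ifs <;> push_cast <;> omega
        · intro j hj
          simp only [List.length_append, List.length_cons, List.length_nil] at hj
          by_cases hlt : j < acc.length
          · rw [List.getElem_append_left hlt]; exact helem j hlt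
          · have hje : j = acc.length := by omega
            have hval : (acc ++ [offset + 1])[j] = offset + 1 := by
              simp [List.getElem_append_right, hje]
            rw [hval]
            subst hoff
            simp only [pvGTwo]
            have e1 : j / 3 = acc.length / 3 := by omega
            simp only [e1, if_pos (show j % 3 = 2 by omega), if_pos h3]
    · rw [pvLoopTwo, if_neg hc]
      exact ⟨by omega, helem⟩

lemma pvLoopOne_spec (fuel : Nat) : ∀ (N o0 : Int) (acc : List Int) (offset COUNT : Int),
    N.toNat ≤ acc.length + fuel →
    (acc.length = 0 ∨ acc.length % 3 = 1) →
    COUNT = ((acc.length + 2) / 3 : Nat) →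
    offset = o0 + ((acc.length + 2) / 3 : Nat) →
    (∀ j (hj : j < acc.length), acc[j] = pvGOne o0 j) →
    N ≤ ((pvLoopOne fuel N acc offset COUNT).length : Int) ∧
    ∀ j (hj : j < (pvLoopOne fuel N acc offset COUNT).length),
      (pvLoopOne fuel N acc offset COUNT)[j] = pvGOne o0 j := by
  induction fuel with
  | zero =>
    intro N o0 acc offset COUNT hfuel _ _ _ helem
    refine ⟨by simpa [pvLoopOne] using (by omega : N ≤ (acc.length : Int)), ?_⟩
    simpa [pvLoopOne] using helem
  | succ f ih =>
    intro N o0 acc offset COUNT hfuel hlen hCOUNT hoff helem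
    by_cases hc : (acc.length : Int) < N
    · rcases hlen with h0 | h1
      · -- first iteration: COUNT+1 = 1, append one element
        have hacc : acc = [] := List.eq_nil_of_length_eq_zero h0
        subst hacc
        simp only [List.length_nil] at hfuel
        have hC : COUNT = 0 := by rw [hCOUNT]; norm_num
        subst hC
        rw [pvLoopOne, if_pos hc, if_pos (by norm_num)]
        refine ih N o0 ([] ++ [offset]) (offset + 1) (0 + 1) ?_ ?_ ?_ ?_ ?_
        · simp only [List.length_append, List.length_cons, List.length_nil]; omega
        · simp
        · simp only [List.length_append, List.length_cons, List.length_nil]; norm_num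
        · subst hoff
          simp only [List.length_append, List.length_cons, List.length_nil]; norm_num
        · intro j hj
          simp only [List.length_append, List.length_cons, List.length_nil] at hj
          have hje : j = 0 := by omega
          subst hje hoff
          simp [pvGOne]
      · -- later iterations: COUNT+1 ≠ 1, append three copies of offset
        have hCne : ¬ COUNT + 1 = 1 := by
          rw [hCOUNT]
          have : 1 ≤ (acc.length + 2) / 3 := by omega
          omega
        rw [pvLoopOne, if_pos hc, if_neg hCne]
        refine ih N o0 (acc ++ [offset, offset, offset]) (offset + 1) (COUNT + 1) ?_ ?_ ?_ ?_ ?_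
        · simp only [List.length_append, List.length_cons, List.length_nil]; omega
        · simp only [List.length_append, List.length_cons, List.length_nil]; omega
        · subst hCOUNT
          simp only [List.length_append, List.length_cons, List.length_nil]
          have : (acc.length + 3 + 2) / 3 = (acc.length + 2) / 3 + 1 := by omega
          rw [this]; push_cast; ring
        · subst hoff
          simp only [List.length_append, List.length_cons, List.length_nil]
          have : (acc.length + 3 + 2) / 3 = (acc.length + 2) / 3 + 1 := by omega
          rw [this]; push_cast; ring
        · intro j hj
          simp only [List.length_append, List.length_cons, List.length_nil] at hj
          by_cases hlt : j < acc.length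
          · rw [List.getElem_append_left hlt]; exact helem j hlt
          · have hval : (acc ++ [offset, offset, offset])[j] = offset := by
              rcases (by omega : j = acc.length ∨ j = acc.length + 1 ∨ j = acc.length + 2) with h | h | h <;>
                simp [List.getElem_append_right, h]
            rw [hval]
            subst hoff
            simp only [pvGOne]
            omega
    · rw [pvLoopOne, if_neg hc]
      exact ⟨by omega, helem⟩

-- ===== VERDICT (by name: the statement is the Claim_ definition above) =====
theorem get_pegasus_cell_coordinates_horizontal_heavy_hex_version2_spec : Claim_equal_get_pegasus_cell_coordinates_horizontal_heavy_hex_version2 := by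
  intro N ic _ hpre
  obtain ⟨hmod, hzero⟩ := hpre
  unfold Spec_get_pegasus_cell_coordinates_horizontal_heavy_hex_version2
  unfold get_pegasus_cell_coordinates_horizontal_heavy_hex_version2
  unfold get_pegasus_cell_coordinates_horizontal_heavy_hex_version2_alt
  simp only []
  congr 1
  apply List.map_congr_left
  intro i hi
  rw [PySem.List.mem_pyRange_one] at hi
  obtain ⟨hi0, hiN⟩ := hi
  have hiN' : i < N := by omega
  have hN1 : 1 ≤ N := by omega
  have htwo := pvLoopTwo_spec N.toNat N ic.2.2 [] (PySem.Int.mod ic.2.2 2) ic.2.2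
    (by simp) (by simp) (by simpa using hmod) (by simp) (by intro j hj; simp at hj)
  have hone := pvLoopOne_spec N.toNat N ic.2.1 [] ic.2.1 0
    (by simp) (by simp) (by simp) (by simp) (by intro j hj; simp at hj)
  obtain ⟨htlen, htel⟩ := htwo
  obtain ⟨holen, hoel⟩ := hone
  rw [Prod.mk.injEq, Prod.mk.injEq]
  refine ⟨?_, ?_, ?_⟩
  · -- first coordinate: pattern[i % 3] on both sides
    rw [PySem.List.pyGetD_map_pyRange_of_nonneg _ N i 0 hi0 hiN']
    rcases hzero hN1 with h | h | h <;> rw [h] <;> rfl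
  · -- second coordinate
    rw [PySem.List.pyGetD_eq_getElem _ 0 hi0 (by omega)]
    rw [hoel i.toNat (by omega)]
    simp only [pvGOne]
    rw [PySem.Int.floordiv_eq_ediv_of_pos (by omega : (0:Int) < 3)]
    omega
  · -- third coordinate
    rw [PySem.List.pyGetD_eq_getElem _ 0 hi0 (by omega)]
    rw [htel i.toNat (by omega)]
    simp only [pvGTwo]
    rw [PySem.Int.floordiv_eq_ediv_of_pos (by omega : (0:Int) < 3),
        PySem.Int.mod_eq_emod_of_pos (by omega : (0:Int) < 3)]
    split_ifs with h1 h2 h2 <;> omega
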